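-- pv_equiv track=rewrite | github.com/FabianJnr/CSCI-121 | down_up.py | down_up
-- ===== SOURCE A (Python) =====
-- def down_up(number):
--
--     n = number
--     list_of_numbers = []
--     while n > 0:
--         list_of_numbers.append(n)
--         n -= 1
--
--     for num in range(2, number+1):
--         list_of_numbers.append(num)
--     return list_of_numbers
-- ===== SOURCE B (Python) =====
-- def down_up(number):
--     return [abs(i - (number - 1)) + 1 for i in range(2 * number - 1)]
-- ===== Notes on version B (the rewrite author's own statement) =====
-- stated objective: simpler
-- what changed: Replaces A's two generating loops (while countdown then for count-up) with a single comprehension computing each element directly by the closed-form index formula abs(i-(n-1))+1 over range(2n-1).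
import Mathlib
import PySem

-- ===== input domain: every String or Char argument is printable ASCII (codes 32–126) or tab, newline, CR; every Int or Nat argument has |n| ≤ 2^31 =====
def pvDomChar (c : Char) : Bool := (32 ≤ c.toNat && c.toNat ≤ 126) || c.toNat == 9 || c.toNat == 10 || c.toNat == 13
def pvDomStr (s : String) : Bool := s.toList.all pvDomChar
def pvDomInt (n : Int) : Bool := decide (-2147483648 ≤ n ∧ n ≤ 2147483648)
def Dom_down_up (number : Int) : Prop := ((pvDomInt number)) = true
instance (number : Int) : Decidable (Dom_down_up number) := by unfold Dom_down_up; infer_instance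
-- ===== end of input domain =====

-- B computes each element by the closed-form index formula |i-(n-1)|+1 over one range,
-- instead of A's two generating loops (objective: simpler).

-- ===== PORT A =====
-- while n > 0: list_of_numbers.append(n); n -= 1
def down_up_loop (n : Int) (acc : List Int) : List Int :=
  if _h : n > 0 then down_up_loop (n - 1) (acc ++ [n]) else acc
termination_by n.toNat
decreasing_by omega

def down_up (number : Int) : List Int :=
  -- for num in range(2, number+1): list_of_numbers.append(num)
  (PySem.List.pyRange 2 (number + 1) 1).foldl (fun acc num => acc ++ [num])
    (down_up_loop number [])

-- ===== PORT B =====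
def down_up_alt (number : Int) : List Int :=
  (PySem.List.pyRange 0 (2 * number - 1) 1).map (fun i => |i - (number - 1)| + 1)

-- ===== PRECONDITION & SPEC =====
def Spec_down_up (number : Int) (out : List Int) : Prop := out = down_up_alt number
instance (number : Int) (out : List Int) : Decidable (Spec_down_up number out) := by unfold Spec_down_up; infer_instance

-- ===== CLAIM (what is proved, stated in full; the proofs are below) =====
def Claim_equal_down_up : Prop := ∀ (number : Int), Dom_down_up number → Spec_down_up number (down_up number)

-- ===== LEMMAS AND PROOFS =====

theorem down_up_loop_eq (n : Int) (acc : List Int) :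
    down_up_loop n acc = acc ++ PySem.List.pyRange n 0 (-1) := by
  by_cases h : n > 0
  · rw [down_up_loop, dif_pos h, down_up_loop_eq (n - 1),
      PySem.List.pyRange_neg_one_cons h]
    simp
  · rw [down_up_loop, dif_neg h,
      PySem.List.pyRange_neg_one_eq_nil (by omega)]
    simp
termination_by n.toNat
decreasing_by omega

theorem foldl_snoc (xs : List Int) (init : List Int) :
    xs.foldl (fun acc num => acc ++ [num]) init = init ++ xs := by
  induction xs generalizing init with
  | nil => simp
  | cons x xs ih => simp [List.foldl_cons, ih]

-- the first n entries of B (indices 0..n-1) are the countdown n..1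
theorem alt_down_half (n : Int) (hn : 0 < n) :
    (PySem.List.pyRange 0 n 1).map (fun i => |i - (n - 1)| + 1)
      = PySem.List.pyRange n 0 (-1) := by
  rw [PySem.List.pyRange_one, PySem.List.pyRange_neg_one, List.map_map]
  simp only [Int.sub_zero, Int.zero_add]
  apply List.map_congr_left
  intro k hk
  simp only [List.mem_range] at hk
  have hk' : (k : Int) < n := by
    simpa using (Int.ofNat_lt.mpr hk).trans_le (by simp [Int.toNat_of_nonneg hn.le])
  have : |(k : Int) - (n - 1)| = (n - 1) - k := by
    rw [abs_of_nonpos (by omega)]; ring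
  simp only [Function.comp, this]
  ring

-- the remaining entries (indices n..2n-2) are the count-up 2..n
theorem alt_up_half (n : Int) :
    (PySem.List.pyRange n (2 * n - 1) 1).map (fun i => |i - (n - 1)| + 1)
      = PySem.List.pyRange 2 (n + 1) 1 := by
  rw [PySem.List.pyRange_one, PySem.List.pyRange_one, List.map_map]
  have : (2 * n - 1 - n) = (n + 1 - 2) := by ring
  rw [this]
  apply List.map_congr_left
  intro k hk
  have : |(n : Int) + k - (n - 1)| = (k : Int) + 1 := by
    rw [abs_of_nonneg (by omega)]; ring
  simp only [Function.comp, this]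
  ring

-- ===== VERDICT (by name: the statement is the Claim_ definition above) =====
theorem down_up_spec : Claim_equal_down_up := by
  intro number _
  unfold Spec_down_up down_up down_up_alt
  rw [down_up_loop_eq, foldl_snoc, List.nil_append]
  by_cases hn : 0 < number
  · rw [PySem.List.pyRange_one_append 0 number (2 * number - 1) (by omega) (by omega),
      List.map_append, alt_down_half number hn, alt_up_half number]
  · rw [PySem.List.pyRange_neg_one_eq_nil (by omega),
      PySem.List.pyRange_one_eq_nil (by omega),
      PySem.List.pyRange_one_eq_nil (by omega)]
    simp
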